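-- pv_equiv track=rewrite | github.com/lewis6991/tcl-ls | src/tcl_lsp/parser/helpers.py | consume_bare_variable_name_end
-- ===== SOURCE A (Python) =====
-- _BARE_VARIABLE_SEGMENT_CHARS = frozenset(
--     'abcdefghijklmnopqrstuvwxyzABCDEFGHIJKLMNOPQRSTUVWXYZ0123456789_'
-- )
--
-- def consume_bare_variable_name_end(text: str, start_index: int) -> int:
--     index = start_index
--     if index >= len(text):
--         return start_index
--
--     if text.startswith('::', index):
--         index += 2
--     elif text[index] in _BARE_VARIABLE_SEGMENT_CHARS:
--         index += 1
--     else: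
--         return start_index
--
--     while index < len(text):
--         if text[index] in _BARE_VARIABLE_SEGMENT_CHARS:
--             index += 1
--             continue
--         if text.startswith('::', index):
--             index += 2
--             continue
--         break
--
--     return index
-- ===== SOURCE B (Python) =====
-- import re
--
-- # One anchored regex does the whole scan: one-or-more repetitions of either a
-- # '::' namespace separator or a bare-name character, matched greedily from
-- # start_index.
-- _BARE = re.compile(r'(?:::|[A-Za-z0-9_])+')
--
--
-- def consume_bare_variable_name_end(text: str, start_index: int) -> int:
--     m = _BARE.match(text, start_index)
--     return m.end() if m else start_index
-- ===== Notes on version B (the rewrite author's own statement) =====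
-- stated objective: idiomatic
-- what changed: Replaces the explicit first-char check plus the per-character while-loop with a single module-level compiled regex (?:::|[A-Za-z0-9_])+ anchored at start_index, returning the match end.
-- outside the precondition, e.g. on consume_bare_variable_name_end('a!', -2): A returns -1, B returns 1; on consume_bare_variable_name_end('a', -5): A raises IndexError, B returns 1
import Mathlib
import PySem

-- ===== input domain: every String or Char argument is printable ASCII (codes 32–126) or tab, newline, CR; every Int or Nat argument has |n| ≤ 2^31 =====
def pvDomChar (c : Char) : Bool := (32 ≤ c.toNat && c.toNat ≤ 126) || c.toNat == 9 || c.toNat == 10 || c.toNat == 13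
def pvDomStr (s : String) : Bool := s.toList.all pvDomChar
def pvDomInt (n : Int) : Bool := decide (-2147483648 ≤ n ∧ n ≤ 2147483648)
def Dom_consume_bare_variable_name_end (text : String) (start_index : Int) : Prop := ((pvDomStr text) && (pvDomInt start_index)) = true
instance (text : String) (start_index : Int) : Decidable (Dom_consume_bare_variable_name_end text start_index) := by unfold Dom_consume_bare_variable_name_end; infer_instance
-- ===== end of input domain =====

-- B replaces A's explicit first-char check plus per-character while-loop by one anchored
-- regex match (?:::|[A-Za-z0-9_])+ from start_index (objective: idiomatic; same O(n) cost).

-- ===== PORT A =====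
-- the frozenset _BARE_VARIABLE_SEGMENT_CHARS
def pvBareChars : List Char :=
  "abcdefghijklmnopqrstuvwxyzABCDEFGHIJKLMNOPQRSTUVWXYZ0123456789_".toList

-- text.startswith('::', i)  ==  text[i:].startswith('::'); exact (same slice clamping)
def pvStartsCC (cs : List Char) (i : Int) : Bool :=
  PySem.Chars.startswith (PySem.List.slice cs (some i) none) [':', ':']

-- the 'while index < len(text)' loop of A; fuel bounds the iterations (index grows each turn)
def pvLoopA (cs : List Char) : Nat → Int → Int
  | 0, i => i
  | fuel + 1, i =>
    if i < (cs.length : Int) then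
      match PySem.List.pyGet? cs i with
      | some c =>
        if pvBareChars.contains c then pvLoopA cs fuel (i + 1)
        else if pvStartsCC cs i then pvLoopA cs fuel (i + 2)
        else i
      | none => i  -- text[index] raises IndexError here (index < -len); outside Pre_
    else i

def consume_bare_variable_name_end (text : String) (start_index : Int) : Int :=
  let cs := text.toList
  let index := start_index
  if index ≥ (cs.length : Int) then start_index
  else if pvStartsCC cs index then
    pvLoopA cs (((cs.length : Int) - (index + 2)).toNat + 1) (index + 2)
  else
    match PySem.List.pyGet? cs index with
    | some c =>
      if pvBareChars.contains c then
        pvLoopA cs (((cs.length : Int) - (index + 1)).toNat + 1) (index + 1)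
      else start_index
    | none => start_index  -- text[index] raises IndexError here; outside Pre_

-- ===== PORT B =====
-- the regex character class [A-Za-z0-9_]
def pvReClass (c : Char) : Bool :=
  ('A' ≤ c && c ≤ 'Z') || ('a' ≤ c && c ≤ 'z') || ('0' ≤ c && c ≤ '9') || c == '_'

-- hand port of matching (?:::|[A-Za-z0-9_])+ : each repetition consumes '::' (tried first)
-- or one class character; exact because ':' is not in the class, so no backtracking can occur
def pvReScan : List Char → Nat → Nat
  | ':' :: ':' :: rest, n => pvReScan rest (n + 2)
  | c :: rest, n => if pvReClass c then pvReScan rest (n + 1) else n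
  | [], n => n

def consume_bare_variable_name_end_alt (text : String) (start_index : Int) : Int :=
  let cs := text.toList
  -- re.Pattern.match clamps pos into [0, len]; exact: for pos > len the scan below sees [] and no match
  let p := (max start_index 0).toNat
  let e := pvReScan (cs.drop p) p
  if e = p then start_index else (e : Int)  -- e = p ↔ zero repetitions ↔ m is None

-- ===== PRECONDITION & SPEC =====
-- Pre_ restricts to the natural domain of a scan position: for negative start_index A either
-- raises IndexError (start_index < -len(text)) or returns a value produced by Python's
-- negative-index wraparound, while B's regex clamps pos to 0 — an unspecified corner either way.
def Pre_consume_bare_variable_name_end (text : String) (start_index : Int) : Prop :=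
  0 ≤ start_index
instance (text : String) (start_index : Int) : Decidable (Pre_consume_bare_variable_name_end text start_index) := by unfold Pre_consume_bare_variable_name_end; infer_instance

def pvWitness_consume_bare_variable_name_end : String × Int := ("::abc x", 0)

def Spec_consume_bare_variable_name_end (text : String) (start_index : Int) (out : Int) : Prop := out = consume_bare_variable_name_end_alt text start_index
instance (text : String) (start_index : Int) (out : Int) : Decidable (Spec_consume_bare_variable_name_end text start_index out) := by unfold Spec_consume_bare_variable_name_end; infer_instance

-- ===== CLAIM (what is proved, stated in full; the proofs are below) =====
def Claim_equal_consume_bare_variable_name_end : Prop := ∀ (text : String) (start_index : Int), Dom_consume_bare_variable_name_end text start_index → Pre_consume_bare_variable_name_end text start_index → Spec_consume_bare_variable_name_end text start_index (consume_bare_variable_name_end text start_index)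

-- ===== LEMMAS AND PROOFS =====

theorem pv_char_eq_iff (c d : Char) : (c = d) ↔ c.toNat = d.toNat :=
  ⟨fun h => h ▸ rfl, fun h => Char.ext (UInt32.toNat_inj.mp h)⟩

theorem pv_char_le_iff (c d : Char) : (c ≤ d) ↔ c.toNat ≤ d.toNat := by
  rw [Char.le_def, UInt32.le_iff_toNat_le]; rfl

theorem pvBareChars_lit : pvBareChars = ['a', 'b', 'c', 'd', 'e', 'f', 'g', 'h', 'i', 'j', 'k', 'l', 'm', 'n', 'o', 'p', 'q', 'r', 's', 't', 'u', 'v', 'w', 'x', 'y', 'z', 'A', 'B', 'C', 'D', 'E', 'F', 'G', 'H', 'I', 'J', 'K', 'L', 'M', 'N', 'O', 'P', 'Q', 'R', 'S', 'T', 'U', 'V', 'W', 'X', 'Y', 'Z', '0', '1', '2', '3', '4', '5', '6', '7', '8', '9', '_'] := by decide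

-- the frozenset membership and the regex class agree on every character
theorem pv_bare_eq (c : Char) : pvBareChars.contains c = pvReClass c := by
  rw [Bool.eq_iff_iff, pvBareChars_lit]
  simp only [pvReClass, List.contains_iff_mem, List.mem_cons, List.not_mem_nil, or_false,
    pv_char_eq_iff, pv_char_le_iff, beq_iff_eq, Bool.or_eq_true, Bool.and_eq_true,
    decide_eq_true_eq]
  simp only [Char.reduceToNat]
  omega

theorem pvReClass_colon : pvReClass ':' = false := by decide

theorem pvReScan_cons_cc (rest : List Char) (n : Nat) :
    pvReScan (':' :: ':' :: rest) n = pvReScan rest (n + 2) := rfl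

theorem pvReScan_cons_not_cc (c : Char) (rest : List Char) (n : Nat)
    (h : ¬(c = ':' ∧ rest.head? = some ':')) :
    pvReScan (c :: rest) n = if pvReClass c then pvReScan rest (n + 1) else n := by
  rw [pvReScan.eq_def]
  split
  · rename_i heq
    injection heq with h1 h2
    exact absurd ⟨h1, by rw [h2]; rfl⟩ h
  · rename_i heq
    injection heq with h1 h2
    rw [h1, h2]
  · rename_i heq
    cases heq

theorem pvReScan_le (l : List Char) (n : Nat) : n ≤ pvReScan l n := by
  induction l, n using pvReScan.induct with
  | case1 rest n ih => rw [pvReScan_cons_cc]; omega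
  | case2 c rest n hne hcl ih =>
    rw [pvReScan_cons_not_cc c rest n (fun hh => by
      rcases hh with ⟨rfl, hh⟩
      cases rest with
      | nil => simp at hh
      | cons d r => simp at hh; exact hne r rfl (by rw [hh])), if_pos hcl]
    omega
  | case3 c rest n hne hcl =>
    rw [pvReScan_cons_not_cc c rest n (fun hh => by
      rcases hh with ⟨rfl, hh⟩
      cases rest with
      | nil => simp at hh
      | cons d r => simp at hh; exact hne r rfl (by rw [hh])), if_neg hcl]
  | case4 n => exact Nat.le_refl n

theorem pvStartsCC_iff (cs : List Char) (p : Nat) :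
    pvStartsCC cs (p : Int) = true ↔ [':', ':'] <+: cs.drop p := by
  unfold pvStartsCC
  rw [PySem.List.slice_from_natCast]
  exact PySem.Chars.startswith_iff _ _

-- one step of the regex scan at a valid position p
theorem pvReScan_step (cs : List Char) (p : Nat) (hp : p < cs.length) :
    pvReScan (cs.drop p) p =
      if [':', ':'] <+: cs.drop p then pvReScan (cs.drop (p + 2)) (p + 2)
      else if pvReClass cs[p] then pvReScan (cs.drop (p + 1)) (p + 1)
      else p := by
  have hdrop : cs.drop p = cs[p] :: cs.drop (p + 1) := List.drop_eq_getElem_cons hp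
  by_cases hcc : [':', ':'] <+: cs.drop p
  · rcases hcc with ⟨t, ht⟩
    have ht' : cs.drop p = ':' :: ':' :: t := by rw [← ht]; rfl
    have ht2 : cs.drop (p + 2) = t := by
      have h2 : cs.drop (p + 2) = (cs.drop p).drop 2 := by rw [List.drop_drop]
      rw [h2, ht']; rfl
    rw [if_pos ⟨t, ht⟩, ht', pvReScan_cons_cc, ht2]
  · rw [if_neg hcc, hdrop, pvReScan_cons_not_cc]
    intro ⟨h1, h2⟩
    apply hcc
    cases hh : cs.drop (p + 1) with
    | nil => rw [hh] at h2; simp at h2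
    | cons d r =>
      rw [hh] at h2; simp at h2
      exact ⟨r, by rw [hdrop, hh, h1, h2]; rfl⟩

-- A's while loop computes the regex scan, given enough fuel
theorem pvLoop_eq (cs : List Char) (fuel : Nat) : ∀ p : Nat, cs.length ≤ p + fuel →
    pvLoopA cs fuel (p : Int) = (pvReScan (cs.drop p) p : Int) := by
  induction fuel with
  | zero =>
    intro p h
    have hd : cs.drop p = [] := List.drop_eq_nil_of_le (by omega)
    rw [hd]
    rfl
  | succ fuel ih =>
    intro p h
    by_cases hp : p < cs.length
    · have hget : PySem.List.pyGet? cs (p : Int) = some cs[p] := by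
        rw [PySem.List.pyGet?_natCast, List.getElem?_eq_getElem hp]
      rw [pvLoopA, if_pos (by exact_mod_cast hp), hget, pvReScan_step cs p hp]
      simp only [pv_bare_eq]
      by_cases hb : pvReClass cs[p]
      · have hncc : ¬ [':', ':'] <+: cs.drop p := by
          intro ⟨t, ht⟩
          have : cs[p] = ':' := by
            have := List.drop_eq_getElem_cons hp
            rw [← ht] at this
            exact (List.cons.injEq .. ▸ this).1.symm
          rw [this, pvReClass_colon] at hb; exact absurd hb (by simp)
        rw [if_pos hb, if_neg hncc, if_pos hb]
        have : (p : Int) + 1 = ((p + 1 : Nat) : Int) := by push_cast; ring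
        rw [this]
        exact ih (p + 1) (by omega)
      · rw [if_neg hb]
        by_cases hcc : [':', ':'] <+: cs.drop p
        · rw [if_pos ((pvStartsCC_iff cs p).mpr hcc), if_pos hcc]
          have : (p : Int) + 2 = ((p + 2 : Nat) : Int) := by push_cast; ring
          rw [this]
          exact ih (p + 2) (by omega)
        · rw [if_neg (by rw [pvStartsCC_iff]; exact hcc), if_neg hcc, if_neg hb]
    · have hd : cs.drop p = [] := List.drop_eq_nil_of_le (by omega)
      rw [pvLoopA, if_neg (by exact_mod_cast hp), hd]
      rfl

-- ===== VERDICT (by name: the statement is the Claim_ definition above) =====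
theorem consume_bare_variable_name_end_spec : Claim_equal_consume_bare_variable_name_end := by
  intro text s _ hpre
  unfold Spec_consume_bare_variable_name_end
  have hpre' : 0 ≤ s := hpre
  simp only [consume_bare_variable_name_end, consume_bare_variable_name_end_alt]
  set cs := text.toList with hcs
  set p := s.toNat with hpdef
  have hsp : s = (p : Int) := (Int.toNat_of_nonneg hpre').symm
  have hmax : (max s 0).toNat = p := by omega
  rw [hmax]
  by_cases hlen : s ≥ (cs.length : Int)
  · rw [if_pos hlen]
    have hd : cs.drop p = [] := List.drop_eq_nil_of_le (by omega)
    rw [hd]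
    simp [pvReScan]
  · rw [if_neg hlen]
    have hp : p < cs.length := by omega
    have hget : PySem.List.pyGet? cs s = some cs[p] := by
      rw [hsp, PySem.List.pyGet?_natCast, List.getElem?_eq_getElem hp]
    rw [pvReScan_step cs p hp]
    by_cases hcc : [':', ':'] <+: cs.drop p
    · rw [hsp, if_pos ((pvStartsCC_iff cs p).mpr hcc), if_pos hcc]
      have hc2 : (p : Int) + 2 = ((p + 2 : Nat) : Int) := by push_cast; ring
      rw [hc2, pvLoop_eq cs _ (p + 2) (by omega)]
      have hne : pvReScan (cs.drop (p + 2)) (p + 2) ≠ p := by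
        have := pvReScan_le (cs.drop (p + 2)) (p + 2); omega
      rw [if_neg hne]
    · rw [hsp, if_neg (by rw [pvStartsCC_iff]; exact hcc), if_neg hcc]
      rw [hsp] at hget
      rw [hget]
      simp only [pv_bare_eq]
      by_cases hb : pvReClass cs[p]
      · rw [if_pos hb, if_pos hb]
        have hc1 : (p : Int) + 1 = ((p + 1 : Nat) : Int) := by push_cast; ring
        rw [hc1, pvLoop_eq cs _ (p + 1) (by omega)]
        have hne : pvReScan (cs.drop (p + 1)) (p + 1) ≠ p := by
          have := pvReScan_le (cs.drop (p + 1)) (p + 1); omega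
        rw [if_neg hne]
      · rw [if_neg hb, if_neg hb, if_pos rfl]
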